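-- pv_equiv track=rewrite | github.com/abdelmageed95/procurement-assistant | procurement_agent/graph/duplicate_detection.py | check_for_duplicate
-- ===== SOURCE A (Python) =====
-- from typing import Dict, Optional, Tuple
--
-- def check_for_duplicate(
--     user_message: str,
--     recent_messages: list,
--     lookback_limit: int = 5
-- ) -> Tuple[bool, Optional[str]]:
--     """
--     Check if the user message is a duplicate of a recent query.
--
--     Args:
--         user_message: Current user message
--         recent_messages: List of recent messages from short-term memory
--         lookback_limit: How many recent messages to check
--
--     Returns:
--         Tuple of (is_duplicate, cached_response)
--         - is_duplicate: True if this is an exact duplicate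
--         - cached_response: The previous assistant response if duplicate, else None
--     """
--     user_message_normalized = user_message.strip().lower()
--
--     # Look through recent messages in reverse (most recent first)
--     for i in range(len(recent_messages) - 1, -1, -1):
--         msg = recent_messages[i]
--
--         # Only check user messages
--         if msg.get("role") != "user":
--             continue
--
--         # Check for exact match (case-insensitive)
--         if msg.get("content", "").strip().lower() == user_message_normalized:
--             # Found a duplicate - try to get the corresponding response
--             # Look for the next assistant message after this user message
--             for j in range(i + 1, len(recent_messages)):
--                 if recent_messages[j].get("role") == "assistant":
--                     cached_response = recent_messages[j].get("content", "")
--                     return True, cached_response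
--
--             # Found duplicate but no response (shouldn't happen normally)
--             return True, None
--
--     return False, None
-- ===== SOURCE B (Python) =====
-- def check_for_duplicate(
--     user_message: str,
--     recent_messages: list,
--     lookback_limit: int = 5
-- ):
--     """Single forward pass: remember whether a duplicate user message was seen
--     and capture the first assistant reply that follows the last match."""
--     target = user_message.strip().lower()
--     is_duplicate = False
--     cached_response = None
--     waiting = False
--     for msg in recent_messages:
--         if msg.get("role") == "user" and msg.get("content", "").strip().lower() == target:
--             is_duplicate = True
--             cached_response = None
--             waiting = True
--         elif waiting and msg.get("role") == "assistant":
--             cached_response = msg.get("content", "")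
--             waiting = False
--     return is_duplicate, cached_response
-- ===== Notes on version B (the rewrite author's own statement) =====
-- stated objective: simpler
-- what changed: Replaced the reverse index scan with a quadratic nested forward rescan (for each matching user message, scan ahead for the assistant reply) by a single forward pass keeping two state variables (duplicate flag and the reply captured after the most recent match).
import Mathlib
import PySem

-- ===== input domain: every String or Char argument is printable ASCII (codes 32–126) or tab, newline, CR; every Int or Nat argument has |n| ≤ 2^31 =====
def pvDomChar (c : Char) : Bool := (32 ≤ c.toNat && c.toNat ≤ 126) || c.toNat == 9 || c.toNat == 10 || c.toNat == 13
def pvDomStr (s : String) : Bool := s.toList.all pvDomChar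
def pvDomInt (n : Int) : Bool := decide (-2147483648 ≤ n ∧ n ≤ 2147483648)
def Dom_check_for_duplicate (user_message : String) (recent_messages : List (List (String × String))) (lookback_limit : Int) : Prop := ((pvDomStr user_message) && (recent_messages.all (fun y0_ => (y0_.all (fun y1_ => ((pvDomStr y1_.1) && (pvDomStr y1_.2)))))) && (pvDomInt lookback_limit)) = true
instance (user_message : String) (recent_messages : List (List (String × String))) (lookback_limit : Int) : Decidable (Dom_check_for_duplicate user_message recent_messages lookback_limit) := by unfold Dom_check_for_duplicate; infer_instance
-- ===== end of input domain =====

-- B replaces A's reverse index scan + nested forward rescan by one forward pass with two state variables (simpler, one pass).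

-- ===== PORT A =====
-- A's inner loop 'for j in range(i+1, len(...))': scan the suffix after the matched user message for the first assistant reply.
def pvInnerA : List (List (String × String)) → Bool × Option String
  | [] => (true, none)
  | m :: rest =>
    if PySem.Dict.get? (PySem.Dict.mk m) "role" == some "assistant" then
      (true, some (PySem.Dict.getD (PySem.Dict.mk m) "content" ""))
    else pvInnerA rest

-- A's outer loop 'for i in range(len(...)-1, -1, -1)' with early return, ported as the structural
-- recursion that examines later elements first (exact: every index access of A is in range, and the
-- element at index i is followed exactly by 'rest').
def pvOuterA (umn : String) : List (List (String × String)) → Bool × Option String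
  | [] => (false, none)
  | m :: rest =>
    let r := pvOuterA umn rest
    if r.1 then r
    else if PySem.Dict.get? (PySem.Dict.mk m) "role" == some "user" then
      if PySem.Str.lower (PySem.Str.strip (PySem.Dict.getD (PySem.Dict.mk m) "content" "")) == umn
      then pvInnerA rest
      else r
    else r

def check_for_duplicate (user_message : String) (recent_messages : List (List (String × String))) (lookback_limit : Int) : Bool × Option String :=
  pvOuterA (PySem.Str.lower (PySem.Str.strip user_message)) recent_messages

-- ===== PORT B =====
-- state = (is_duplicate, cached_response, waiting)
def pvStepB (umn : String) (st : Bool × Option String × Bool) (m : List (String × String)) : Bool × Option String × Bool :=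
  if (PySem.Dict.get? (PySem.Dict.mk m) "role" == some "user") &&
     (PySem.Str.lower (PySem.Str.strip (PySem.Dict.getD (PySem.Dict.mk m) "content" "")) == umn) then
    (true, none, true)
  else if st.2.2 && (PySem.Dict.get? (PySem.Dict.mk m) "role" == some "assistant") then
    (st.1, some (PySem.Dict.getD (PySem.Dict.mk m) "content" ""), false)
  else st

def check_for_duplicate_alt (user_message : String) (recent_messages : List (List (String × String))) (lookback_limit : Int) : Bool × Option String :=
  let umn := PySem.Str.lower (PySem.Str.strip user_message)
  let st := recent_messages.foldl (pvStepB umn) (false, none, false)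
  (st.1, st.2.1)

-- ===== PRECONDITION & SPEC =====
def Spec_check_for_duplicate (user_message : String) (recent_messages : List (List (String × String))) (lookback_limit : Int) (out : Bool × Option String) : Prop := out = check_for_duplicate_alt user_message recent_messages lookback_limit
instance (user_message : String) (recent_messages : List (List (String × String))) (lookback_limit : Int) (out : Bool × Option String) : Decidable (Spec_check_for_duplicate user_message recent_messages lookback_limit out) := by unfold Spec_check_for_duplicate; infer_instance

-- ===== CLAIM (what is proved, stated in full; the proofs are below) =====
def Claim_equal_check_for_duplicate : Prop := ∀ (user_message : String) (recent_messages : List (List (String × String))) (lookback_limit : Int), Dom_check_for_duplicate user_message recent_messages lookback_limit → Spec_check_for_duplicate user_message recent_messages lookback_limit (check_for_duplicate user_message recent_messages lookback_limit)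

-- ===== LEMMAS AND PROOFS =====

-- pvInnerA always reports true in its first component.
lemma pvInnerA_fst : ∀ xs : List (List (String × String)), (pvInnerA xs).1 = true := by
  intro xs
  induction xs with
  | nil => rfl
  | cons m rest ih => simp only [pvInnerA]; split <;> simp_all

-- If A's reverse scan found no duplicate, it returns (false, none).
lemma pvOuterA_of_not_fst (umn : String) :
    ∀ xs : List (List (String × String)), (pvOuterA umn xs).1 = false → pvOuterA umn xs = (false, none) := by
  intro xs
  induction xs with
  | nil => intro _; rfl
  | cons m rest ih =>
    intro h
    simp only [pvOuterA] at h ⊢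
    by_cases hr : (pvOuterA umn rest).1 = true
    · rw [if_pos hr] at h; exact absurd h (by simp [hr])
    · rw [if_neg hr] at h ⊢
      by_cases hu : (PySem.Dict.get? (PySem.Dict.mk m) "role" == some "user") = true
      · rw [if_pos hu] at h ⊢
        by_cases hc : (PySem.Str.lower (PySem.Str.strip (PySem.Dict.getD (PySem.Dict.mk m) "content" "")) == umn) = true
        · rw [if_pos hc] at h; exact absurd h (by simp [pvInnerA_fst rest])
        · rw [if_neg hc] at h ⊢; exact ih h
      · rw [if_neg hu] at h ⊢; exact ih h

-- Characterisation of B's fold from an arbitrary state in terms of A's helpers.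
lemma foldB_char (umn : String) :
    ∀ (xs : List (List (String × String))) (s : Bool × Option String × Bool),
      xs.foldl (pvStepB umn) s =
        if (pvOuterA umn xs).1 then
          (true, (pvOuterA umn xs).2, ((pvOuterA umn xs).2).isNone)
        else if s.2.2 then
          match (pvInnerA xs).2 with
          | some c => (s.1, some c, false)
          | none => s
        else s := by
  intro xs
  induction xs with
  | nil =>
    intro s
    obtain ⟨d, c, w⟩ := s
    cases w <;> simp [pvOuterA, pvInnerA]
  | cons m rest ih =>
    intro s
    rw [List.foldl_cons, ih]
    by_cases hm : ((PySem.Dict.get? (PySem.Dict.mk m) "role" == some "user") &&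
        (PySem.Str.lower (PySem.Str.strip (PySem.Dict.getD (PySem.Dict.mk m) "content" "")) == umn)) = true
    · -- m is a matching user message
      obtain ⟨hu, hc⟩ := Bool.and_eq_true_iff.mp hm
      have hstep : pvStepB umn s m = (true, none, true) := by simp [pvStepB, hm]
      rw [hstep]
      simp only [pvOuterA, hu, hc, if_true]
      by_cases hr : (pvOuterA umn rest).1
      · simp [hr]
      · simp only [hr, Bool.false_eq_true, if_false, pvInnerA_fst rest, if_true]
        cases (pvInnerA rest).2 <;> simp [Option.isNone]
    · -- m is not a matching user message: A's outer result on m::rest is the rest's result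
      have houter : pvOuterA umn (m :: rest) = pvOuterA umn rest := by
        simp only [pvOuterA]
        by_cases hr : (pvOuterA umn rest).1
        · simp [hr]
        · by_cases hu : (PySem.Dict.get? (PySem.Dict.mk m) "role" == some "user") = true
          · by_cases hc : (PySem.Str.lower (PySem.Str.strip (PySem.Dict.getD (PySem.Dict.mk m) "content" "")) == umn) = true
            · exact absurd (Bool.and_eq_true_iff.mpr ⟨hu, hc⟩) (by simp_all)
            · simp [hr, hu, hc]
          · simp [hr, hu]
      rw [houter]
      by_cases ha : (PySem.Dict.get? (PySem.Dict.mk m) "role" == some "assistant") = true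
      · -- assistant message
        obtain ⟨d, c, w⟩ := s
        cases w with
        | false =>
          have hstep : pvStepB umn (d, c, false) m = (d, c, false) := by
            simp [pvStepB, hm]
          rw [hstep]
          simp
        | true =>
          have hstep : pvStepB umn (d, c, true) m =
              (d, some (PySem.Dict.getD (PySem.Dict.mk m) "content" ""), false) := by
            simp [pvStepB, hm, ha]
          rw [hstep]
          by_cases hr : (pvOuterA umn rest).1
          · simp [hr]
          · have hia : pvInnerA (m :: rest) =
                (true, some (PySem.Dict.getD (PySem.Dict.mk m) "content" "")) := by
              simp [pvInnerA, ha]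
            simp [hr, hia]
      · -- neither a matching user nor an assistant message: state unchanged, helpers skip m
        have hstep : pvStepB umn s m = s := by
          obtain ⟨d, c, w⟩ := s
          cases w <;> simp [pvStepB, hm, ha]
        rw [hstep]
        have hinner : pvInnerA (m :: rest) = pvInnerA rest := by
          simp [pvInnerA, ha]
        rw [hinner]

-- ===== VERDICT (by name: the statement is the Claim_ definition above) =====
theorem check_for_duplicate_spec : Claim_equal_check_for_duplicate := by
  intro um msgs lb _hdom
  show pvOuterA (PySem.Str.lower (PySem.Str.strip um)) msgs =
    ((msgs.foldl (pvStepB (PySem.Str.lower (PySem.Str.strip um))) (false, none, false)).1,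
     (msgs.foldl (pvStepB (PySem.Str.lower (PySem.Str.strip um))) (false, none, false)).2.1)
  rw [foldB_char]
  by_cases hr : (pvOuterA (PySem.Str.lower (PySem.Str.strip um)) msgs).1
  · simp only [hr, if_true]
    exact Prod.ext_iff.mpr ⟨hr, rfl⟩
  · rw [pvOuterA_of_not_fst _ _ (Bool.not_eq_true _ ▸ hr)]
    simp
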